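-- pv_equiv track=rewrite | github.com/Once-1296/WebDev-progress | Project_Linkly/app.py | prime_increment_base58
-- ===== SOURCE A (Python) =====
-- PRIME_INCREMENT = [3,15,44,24,4,7]
--
-- def prime_increment_base58(indices):
--     # add prime (1<<31) - 1
--     arr = indices[:]
--     i = len(arr) - 1
--     carry = 0
--     while i >= 0:
--         arr[i] = (arr[i] + PRIME_INCREMENT[i] + carry)
--         carry = 1 if arr[i] >=58 else 0
--         arr[i] =(arr[i])%58
--         i -= 1
--     return arr
-- ===== SOURCE B (Python) =====
-- PRIME_INCREMENT = [3,15,44,24,4,7]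
--
-- def prime_increment_base58(indices):
--     # carry-select: one LEFT-to-right scan; keep two speculative results for the
--     # prefix processed so far, one for each possible carry (0/1) entering the
--     # prefix from the right; at the end no carry enters, so return the carry-0 one.
--     out0, out1 = [], []
--     for i, v in enumerate(indices):
--         s = v + PRIME_INCREMENT[i]          # same indexing: length > 6 raises IndexError
--         new0 = (out1 if s >= 58 else out0) + [s % 58]
--         new1 = (out1 if s + 1 >= 58 else out0) + [(s + 1) % 58]
--         out0, out1 = new0, new1
--     return out0
-- ===== Notes on version B (the rewrite author's own statement) =====
-- stated objective: alternative
-- what changed: A propagates the carry right-to-left through an in-place index while-loop; B never propagates a carry at all: a carry-select scheme scans left-to-right once, maintaining two speculative result lists (one per possible carry entering the prefix from the right) and selecting between them, returning the carry-0 branch at the end.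
import Mathlib
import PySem

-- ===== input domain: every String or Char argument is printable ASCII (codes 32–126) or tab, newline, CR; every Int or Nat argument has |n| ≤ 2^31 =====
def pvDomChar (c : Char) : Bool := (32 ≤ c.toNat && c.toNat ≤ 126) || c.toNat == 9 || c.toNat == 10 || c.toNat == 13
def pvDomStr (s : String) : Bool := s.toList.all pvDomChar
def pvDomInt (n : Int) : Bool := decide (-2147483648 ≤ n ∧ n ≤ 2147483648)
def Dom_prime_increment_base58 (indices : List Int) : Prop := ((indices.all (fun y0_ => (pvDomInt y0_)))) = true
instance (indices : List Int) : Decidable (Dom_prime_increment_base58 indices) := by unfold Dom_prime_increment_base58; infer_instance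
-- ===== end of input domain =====

-- B replaces A's right-to-left in-place carry-propagation loop by a left-to-right
-- carry-select scan keeping two speculative outputs (objective: alternative algorithm).


def pvPRIME : List Int := [3, 15, 44, 24, 4, 7]

-- ===== PORT A =====
-- A's while loop: i runs from len(arr)-1 down to 0; arr updated in place (fuel n = i+1).
def pvALoop : Nat → List Int → Int → List Int
  | 0, arr, _ => arr
  | n+1, arr, carry =>
      let v := arr.getD n 0 + pvPRIME.getD n 0 + carry
      let c : Int := if v ≥ 58 then 1 else 0
      pvALoop n (arr.set n (PySem.Int.mod v 58)) c

def prime_increment_base58 (indices : List Int) : List Int :=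
  pvALoop indices.length indices 0

-- ===== PORT B =====
-- B's single left-to-right scan: state (out0, out1), the speculative prefix results.
def pvBScan : List (Int × Int) → List Int → List Int → List Int
  | [], out0, _ => out0
  | (i, v) :: rest, out0, out1 =>
      let s := v + pvPRIME.getD i.toNat 0
      let new0 := (if s ≥ 58 then out1 else out0) ++ [PySem.Int.mod s 58]
      let new1 := (if s + 1 ≥ 58 then out1 else out0) ++ [PySem.Int.mod (s + 1) 58]
      pvBScan rest new0 new1

def prime_increment_base58_alt (indices : List Int) : List Int :=
  pvBScan (PySem.List.enumerate indices) [] []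

-- ===== PRECONDITION & SPEC =====
-- Pre_ excludes lists longer than 6, on which A (and B) raise IndexError on PRIME_INCREMENT.
def Pre_prime_increment_base58 (indices : List Int) : Prop := indices.length ≤ 6
instance (indices : List Int) : Decidable (Pre_prime_increment_base58 indices) := by unfold Pre_prime_increment_base58; infer_instance
def pvWitness_prime_increment_base58 : List Int := [10, 60, 3]

def Spec_prime_increment_base58 (indices : List Int) (out : List Int) : Prop := out = prime_increment_base58_alt indices
instance (indices : List Int) (out : List Int) : Decidable (Spec_prime_increment_base58 indices out) := by unfold Spec_prime_increment_base58; infer_instance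

-- ===== CLAIM (what is proved, stated in full; the proofs are below) =====
def Claim_equal_prime_increment_base58 : Prop := ∀ (indices : List Int), Dom_prime_increment_base58 indices → Pre_prime_increment_base58 indices → Spec_prime_increment_base58 indices (prime_increment_base58 indices)

-- ===== LEMMAS AND PROOFS =====

-- Reference: right-to-left recursion; returns (digits, carry emitted to the left).
def pvRefc : Nat → List Int → Int → List Int × Int
  | _, [], cin => ([], cin)
  | i, x :: rest, cin =>
      let r := pvRefc (i+1) rest cin
      let s := x + pvPRIME.getD i 0 + r.2
      ((PySem.Int.mod s 58) :: r.1, if s ≥ 58 then (1:Int) else 0)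

lemma pvRefc_carry01 (i : Nat) (xs : List Int) :
    (pvRefc i xs 0).2 = 0 ∨ (pvRefc i xs 0).2 = 1 := by
  cases xs with
  | nil => left; rfl
  | cons x rest =>
      simp only [pvRefc]
      split_ifs <;> simp

lemma pvALoop_append (n : Nat) (xs extra : List Int) (c : Int) (h : n ≤ xs.length) :
    pvALoop n (xs ++ extra) c = pvALoop n xs c ++ extra := by
  induction n generalizing xs c with
  | zero => simp [pvALoop]
  | succ m ih =>
      have hm : m < xs.length := by omega
      simp only [pvALoop]
      rw [List.getD_append _ _ _ _ hm, List.set_append_left _ _ hm,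
        ih _ _ (by simpa using Nat.le_of_lt hm)]

lemma pvRefc_snoc (xs : List Int) (i : Nat) (x cin : Int) :
    pvRefc i (xs ++ [x]) cin =
      (let s := x + pvPRIME.getD (i + xs.length) 0 + cin
       ((pvRefc i xs (if s ≥ 58 then (1:Int) else 0)).1 ++ [PySem.Int.mod s 58],
        (pvRefc i xs (if s ≥ 58 then (1:Int) else 0)).2)) := by
  induction xs generalizing i with
  | nil => simp [pvRefc]
  | cons y ys ih =>
      simp only [List.cons_append, pvRefc, ih (i+1)]
      have : i + 1 + ys.length = i + (y :: ys).length := by simp; omega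
      rw [this]

lemma pvALoop_eq_refc (xs : List Int) (c : Int) :
    pvALoop xs.length xs c = (pvRefc 0 xs c).1 := by
  induction xs using List.reverseRecOn generalizing c with
  | nil => rfl
  | append_singleton ys y ih =>
      have hlen : (ys ++ [y]).length = ys.length + 1 := by simp
      rw [hlen]
      simp only [pvALoop]
      have hget : (ys ++ [y]).getD ys.length 0 = y := by
        simp [List.getD]
      have hset : ∀ d : Int, (ys ++ [y]).set ys.length d = ys ++ [d] := by
        intro d
        rw [List.set_append_right _ _ (le_refl _)]
        simp
      rw [hget, hset, pvALoop_append _ _ _ _ (le_refl _), ih, pvRefc_snoc]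
      simp

lemma pvBScan_eq_refc (xs : List Int) (k : Nat) (out0 out1 : List Int) :
    pvBScan (PySem.List.enumerate xs (k : Int)) out0 out1 =
      (if (pvRefc k xs 0).2 = 1 then out1 else out0) ++ (pvRefc k xs 0).1 := by
  induction xs generalizing k out0 out1 with
  | nil => simp [PySem.List.enumerate_nil, pvBScan, pvRefc]
  | cons x rest ih =>
      rw [PySem.List.enumerate_cons]
      simp only [pvBScan, Int.toNat_natCast]
      have hk1 : (k : Int) + 1 = ((k + 1 : Nat) : Int) := by push_cast; ring
      rw [hk1, ih]
      rcases pvRefc_carry01 (k+1) rest with h0 | h1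
      · simp only [pvRefc, h0]
        split_ifs with h1' h2' h3' <;> simp_all <;> omega
      · simp only [pvRefc, h1]
        split_ifs with h1' h2' h3' <;> simp_all


-- ===== VERDICT (by name: the statement is the Claim_ definition above) =====
theorem prime_increment_base58_spec : Claim_equal_prime_increment_base58 := by
  intro indices _ _
  unfold Spec_prime_increment_base58
  unfold prime_increment_base58 prime_increment_base58_alt
  have h0 : (0 : Int) = ((0 : Nat) : Int) := by norm_num
  rw [pvALoop_eq_refc, h0, pvBScan_eq_refc]
  simp
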